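-- pv_equiv track=rewrite | github.com/Darthholi/DocumentConcepts | attention.py | _care_inputs
-- ===== SOURCE A (Python) =====
-- import copy
--
-- def _care_inputs(inputs):
--     inputs = copy.copy(inputs)
--     if (isinstance(inputs, list)):
--         while (len(inputs) < 3):
--             inputs.append(inputs[-1])
--         inputs = inputs[0:3]
--     else:
--         inputs = [inputs, inputs, inputs]
--     return inputs
-- ===== SOURCE B (Python) =====
-- import copy
--
-- def _care_inputs(inputs):
--     if isinstance(inputs, list):
--         return [inputs[min(i, len(inputs) - 1)] for i in range(3)]
--     return [inputs, inputs, inputs]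
-- ===== Notes on version B (the rewrite author's own statement) =====
-- stated objective: simpler
-- what changed: Replaces the mutate-pad while-loop plus slice with direct construction of the 3-element result via a clamped-index comprehension over range(3); no copying or mutation.
-- outside the precondition, e.g. on _care_inputs([]): A raises IndexError, B raises IndexError
import Mathlib
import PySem

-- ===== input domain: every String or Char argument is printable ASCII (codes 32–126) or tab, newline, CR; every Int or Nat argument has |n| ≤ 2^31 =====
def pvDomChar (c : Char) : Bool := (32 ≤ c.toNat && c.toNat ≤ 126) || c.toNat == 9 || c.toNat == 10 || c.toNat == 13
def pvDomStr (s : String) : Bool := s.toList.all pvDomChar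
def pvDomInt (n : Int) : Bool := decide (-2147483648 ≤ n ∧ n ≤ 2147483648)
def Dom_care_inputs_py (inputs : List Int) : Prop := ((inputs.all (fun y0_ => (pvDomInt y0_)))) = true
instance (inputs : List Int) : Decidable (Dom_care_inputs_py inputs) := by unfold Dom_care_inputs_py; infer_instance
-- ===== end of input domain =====

-- B replaces A's pad-by-append while-loop plus slice with direct clamped-index construction; objective: simpler (return value only — A copies its argument, neither mutates the caller's list).

-- ===== PORT A =====
-- the 'while len(inputs) < 3: inputs.append(inputs[-1])' loop; each iteration grows the
-- list by one, so 3 iterations of fuel always suffice; 'none' = IndexError (empty list,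
-- excluded by Pre_)
def padA : Nat → List Int → List Int
  | 0, xs => xs
  | n + 1, xs =>
    if xs.length < 3 then
      match PySem.List.pyGet? xs (-1) with
      | some v => padA n (xs ++ [v])
      | none => xs
    else xs

def care_inputs_py (inputs : List Int) : List Int :=
  PySem.List.slice (padA 3 inputs) (some 0) (some 3)

-- ===== PORT B =====
-- [inputs[min(i, len(inputs)-1)] for i in range(3)]; the default 0 of pyGetD is only
-- reached on the empty list (IndexError), which Pre_ excludes
def care_inputs_py_alt (inputs : List Int) : List Int :=
  (PySem.List.pyRange 0 3 1).map
    (fun i => PySem.List.pyGetD inputs (min i ((inputs.length : Int) - 1)) 0)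

-- ===== PRECONDITION & SPEC =====
-- Pre_ excludes exactly the empty list, on which both Pythons raise IndexError.
def Pre_care_inputs_py (inputs : List Int) : Prop := inputs ≠ []
instance (inputs : List Int) : Decidable (Pre_care_inputs_py inputs) := by unfold Pre_care_inputs_py; infer_instance
def pvWitness_care_inputs_py : List Int := ([1, 2])

def Spec_care_inputs_py (inputs : List Int) (out : List Int) : Prop := out = care_inputs_py_alt inputs
instance (inputs : List Int) (out : List Int) : Decidable (Spec_care_inputs_py inputs out) := by unfold Spec_care_inputs_py; infer_instance

-- ===== CLAIM (what is proved, stated in full; the proofs are below) =====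
def Claim_equal_care_inputs_py : Prop := ∀ (inputs : List Int), Dom_care_inputs_py inputs → Pre_care_inputs_py inputs → Spec_care_inputs_py inputs (care_inputs_py inputs)

-- ===== LEMMAS AND PROOFS =====

theorem pyRange3 : PySem.List.pyRange 0 3 1 = [0, 1, 2] := by decide

theorem altEval (xs : List Int) : care_inputs_py_alt xs =
    [PySem.List.pyGetD xs (min 0 ((xs.length : Int) - 1)) 0,
     PySem.List.pyGetD xs (min 1 ((xs.length : Int) - 1)) 0,
     PySem.List.pyGetD xs (min 2 ((xs.length : Int) - 1)) 0] := by
  simp [care_inputs_py_alt, pyRange3]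

theorem padA_ge (n : Nat) (xs : List Int) (h : 3 ≤ xs.length) : padA n xs = xs := by
  cases n with
  | zero => rfl
  | succ m => simp [padA, Nat.not_lt.mpr h]

-- ===== VERDICT (by name: the statement is the Claim_ definition above) =====
theorem care_inputs_py_spec : Claim_equal_care_inputs_py := by
  intro inputs _ hpre
  unfold Spec_care_inputs_py
  match inputs with
  | [] => exact absurd rfl hpre
  | [a] =>
    rw [altEval]
    simp [care_inputs_py, padA, PySem.List.pyGet?, PySem.List.pyIdx?,
      PySem.List.pyGetD, PySem.List.slice]
  | [a, b] =>
    rw [altEval]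
    simp [care_inputs_py, padA, PySem.List.pyGet?, PySem.List.pyIdx?,
      PySem.List.pyGetD, PySem.List.slice]
  | a :: b :: c :: rest =>
    rw [altEval]
    have hl : (3 : Nat) ≤ (a :: b :: c :: rest).length := by simp
    rw [min_eq_left (by simp; omega), min_eq_left (by simp; omega), min_eq_left (by simp; omega)]
    rw [PySem.List.pyGetD_eq_getElem _ _ (by omega) (by simp; omega),
        PySem.List.pyGetD_eq_getElem _ _ (by omega) (by simp; omega),
        PySem.List.pyGetD_eq_getElem _ _ (by omega) (by simp; omega)]
    unfold care_inputs_py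
    rw [padA_ge 3 _ hl]
    simp [PySem.List.slice]
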